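-- pv_equiv track=rewrite | github.com/SeungjipLee/Algorithm | 배준형/Week11/Prog_Lv3.숫자 게임.py | solution
-- ===== SOURCE A (Python) =====
-- def solution(A, B):
--     answer = 0
--     A.sort()
--     B.sort()
--     n = len(A)
--     i, j = n-1, n-1
--     while i >= 0:
--         if B[j] > A[i]:
--             j -= 1
--             i -= 1
--             answer += 1
--             continue
--         i -= 1
--
--     return answer
-- ===== SOURCE B (Python) =====
-- def solution(A, B):
--     # Binary-search the answer itself: feasibility of k (pairing A's k smallest with the
--     # k largest of B's first n, every pair a strict win) is monotone in k, so the answer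
--     # is the largest feasible k.
--     A.sort()
--     B.sort()
--     n = len(A)
--     def feasible(k):
--         return all(a < b for a, b in zip(A[:k], B[n-k:n]))
--     lo, hi = 0, n
--     while lo < hi:
--         mid = (lo + hi + 1) // 2
--         if feasible(mid):
--             lo = mid
--         else:
--             hi = mid - 1
--     return lo
-- ===== Notes on version B (the rewrite author's own statement) =====
-- stated objective: alternative
-- what changed: A counts wins with a descending two-pointer greedy walk over both sorted lists; B instead binary-searches the answer itself, using a monotone pairwise feasibility check (A's k smallest vs the k largest of B's first n all win) and returning the largest feasible k (B also sorts both arguments in place, matching A's mutation).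
import Mathlib
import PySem

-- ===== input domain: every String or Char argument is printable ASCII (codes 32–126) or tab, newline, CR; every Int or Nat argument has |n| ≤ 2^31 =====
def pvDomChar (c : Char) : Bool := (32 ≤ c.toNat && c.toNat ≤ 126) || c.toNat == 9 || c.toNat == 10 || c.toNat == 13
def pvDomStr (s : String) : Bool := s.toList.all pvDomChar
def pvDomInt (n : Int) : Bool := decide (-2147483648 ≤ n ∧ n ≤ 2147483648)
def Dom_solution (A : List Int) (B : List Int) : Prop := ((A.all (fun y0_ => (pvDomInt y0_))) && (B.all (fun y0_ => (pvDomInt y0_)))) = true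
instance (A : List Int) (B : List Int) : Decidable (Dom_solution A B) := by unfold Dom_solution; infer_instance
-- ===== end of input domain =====

-- A walks both sorted lists with a descending two-pointer greedy; B instead binary-searches
-- the answer itself, deciding each candidate k by a pairwise feasibility check (A's k smallest
-- vs the k largest of B's first n must all win) and returning the largest feasible k.
-- Equivalence is about the RETURN value; both Pythons also sort the two argument lists in
-- place, as A does.

-- ===== PORT A =====
-- while i >= 0: if B[j] > A[i]: j -= 1; i -= 1; answer += 1 else i -= 1
-- ported with fuel k = i+1 (i = k-1 ≥ 0 ⇔ k > 0); the `none` arms are Python's IndexError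
-- (unreachable under Pre_solution, where 0 ≤ j < len(B) whenever it is read).
def solutionLoop (As Bs : List Int) : Nat → Int → Int → Int
  | 0, _j, answer => answer
  | k+1, j, answer =>
    match PySem.List.pyGet? Bs j, PySem.List.pyGet? As (k : Int) with
    | some bj, some ai =>
      if ai < bj then solutionLoop As Bs k (j - 1) (answer + 1)
      else solutionLoop As Bs k j answer
    | _, _ => answer

def solution (A : List Int) (B : List Int) : Int :=
  let As := PySem.List.sorted A (fun x => x) false
  let Bs := PySem.List.sorted B (fun x => x) false
  let n : Nat := As.length
  solutionLoop As Bs n ((n : Int) - 1) 0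

-- ===== PORT B =====
-- feasible(k) = all(a < b for a, b in zip(A[:k], B[n-k:n]))
def altCheck (As Bs : List Int) (n : Nat) (k : Int) : Bool :=
  ((PySem.List.slice As none (some k)).zip
    (PySem.List.slice Bs (some ((n : Int) - k)) (some (n : Int)))).all
    (fun p => decide (p.1 < p.2))

-- while lo < hi: mid = (lo+hi+1)//2; if feasible(mid): lo = mid else: hi = mid-1
def altBS (As Bs : List Int) (n : Nat) (lo hi : Int) : Int :=
  if h : lo < hi then
    let mid := PySem.Int.floordiv (lo + hi + 1) 2
    if altCheck As Bs n mid then altBS As Bs n mid hi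
    else altBS As Bs n lo (mid - 1)
  else lo
termination_by (hi - lo).toNat
decreasing_by
  all_goals simp only [PySem.Int.floordiv_eq_ediv_of_pos (by omega : (0:Int) < 2)]
  all_goals omega

def solution_alt (A : List Int) (B : List Int) : Int :=
  let As := PySem.List.sorted A (fun x => x) false
  let Bs := PySem.List.sorted B (fun x => x) false
  let n : Nat := As.length
  altBS As Bs n 0 (n : Int)

-- ===== PRECONDITION & SPEC =====
-- Exactly the inputs on which A returns: if len(A) > len(B), A's first read B[len(A)-1]
-- raises IndexError (when A ≠ []); for len(A) ≤ len(B), A returns normally.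
def Pre_solution (A : List Int) (B : List Int) : Prop := A.length ≤ B.length
instance (A : List Int) (B : List Int) : Decidable (Pre_solution A B) := by unfold Pre_solution; infer_instance
def pvWitness_solution : List Int × List Int := ([5, 1, 3], [2, 5, 6])
def Spec_solution (A : List Int) (B : List Int) (out : Int) : Prop := out = solution_alt A B
instance (A : List Int) (B : List Int) (out : Int) : Decidable (Spec_solution A B out) := by unfold Spec_solution; infer_instance

-- ===== CLAIM (what is proved, stated in full; the proofs are below) =====
def Claim_equal_solution : Prop := ∀ (A : List Int) (B : List Int), Dom_solution A B → Pre_solution A B → Spec_solution A B (solution A B)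

-- ===== LEMMAS AND PROOFS =====

-- abstract descending greedy (A's algorithm on the reversed sorted lists): number of wins
def grun : List Int → List Int → Nat
  | [], _ => 0
  | _ :: _, [] => 0
  | x :: as, y :: bs => if x < y then 1 + grun as bs else grun as (y :: bs)

-- "answer k is feasible": the k smallest of a each lose to the k largest of b, in order
def okUp (a b : List Int) (k : Nat) : Prop :=
  ∀ i, i < k → a.getD i 0 < b.getD (b.length - k + i) 0

-- the heart: the greedy count is the largest feasible k
theorem grun_okUp (n : Nat) : ∀ a b : List Int, a.length = n → a.length ≤ b.length →
    a.Pairwise (· ≤ ·) → b.Pairwise (· ≤ ·) →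
    okUp a b (grun a.reverse b.reverse) ∧ grun a.reverse b.reverse ≤ a.length ∧
      (∀ k, grun a.reverse b.reverse < k → k ≤ a.length → ¬ okUp a b k) := by
  induction n with
  | zero =>
    intro a b ha _ _ _
    rw [List.length_eq_zero_iff] at ha
    subst ha
    refine ⟨?_, by simp [grun], ?_⟩
    · intro i hi; simp [grun] at hi
    · intro k h1 h2 _; simp at h2; omega
  | succ n ih =>
    intro a b ha hlen hsa hsb
    rcases List.eq_nil_or_concat' a with rfl | ⟨c, m, rfl⟩
    · simp at ha
    rcases List.eq_nil_or_concat' b with rfl | ⟨d, mb, rfl⟩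
    · simp at hlen
    have hc : c.length = n := by simpa using ha
    have hcd : c.length ≤ d.length := by simp at hlen; omega
    have hcm : ∀ x ∈ c, x ≤ m := fun x hx => (List.pairwise_append.1 hsa).2.2 x hx m (by simp)
    have hsc : c.Pairwise (· ≤ ·) := (List.pairwise_append.1 hsa).1
    have hsd : d.Pairwise (· ≤ ·) := (List.pairwise_append.1 hsb).1
    have hra : (c ++ [m]).reverse = m :: c.reverse := by simp
    have hrb : (d ++ [mb]).reverse = mb :: d.reverse := by simp
    rw [hra, hrb]
    by_cases hmmb : m < mb
    · -- m beaten by mb: greedy matches the tops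
      obtain ⟨hok, hle, hmax⟩ := ih c d hc hcd hsc hsd
      have hG : grun (m :: c.reverse) (mb :: d.reverse) = 1 + grun c.reverse d.reverse := by
        simp [grun, hmmb]
      rw [hG]
      set gc := grun c.reverse d.reverse with hgc
      have hla : (c ++ [m]).length = c.length + 1 := by simp
      have hlb : (d ++ [mb]).length = d.length + 1 := by simp
      refine ⟨?_, by omega, ?_⟩
      · intro i hi
        rw [hlb]
        by_cases hig : i < gc
        · have hic : i < c.length := by omega
          have hidx : d.length + 1 - (1 + gc) + i = d.length - gc + i := by omega
          have hdlt : d.length - gc + i < d.length := by omega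
          rw [hidx, List.getD_append _ _ _ _ hic, List.getD_append _ _ _ _ hdlt]
          exact hok i hig
        · have hieq : i = gc := by omega
          subst hieq
          have hidx : d.length + 1 - (1 + gc) + gc = d.length := by omega
          rw [hidx, List.getD_append_right _ _ _ _ (le_refl d.length)]
          have h1 : (c ++ [m]).getD gc 0 ≤ m := by
            by_cases hgl : gc < c.length
            · rw [List.getD_append _ _ _ _ hgl, List.getD_eq_getElem _ _ hgl]
              exact hcm _ (List.getElem_mem hgl)
            · have : gc = c.length := by omega
              rw [this, List.getD_append_right _ _ _ _ (le_refl c.length)]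
              simp
          simpa using lt_of_le_of_lt h1 hmmb
      · intro k h1 h2 hup
        refine hmax (k - 1) (by omega) (by simp at h2; omega) ?_
        intro i hi
        have hik : i < k := by omega
        have h3 := hup i hik
        have hic : i < c.length := by simp at h2; omega
        have hidx : (d ++ [mb]).length - k + i = d.length - (k - 1) + i := by
          simp; simp at h2; omega
        have hdlt : d.length - (k - 1) + i < d.length := by simp at h2; omega
        rw [hidx, List.getD_append _ _ _ _ hic, List.getD_append _ _ _ _ hdlt] at h3
        exact h3
    · -- mb beats nothing: greedy discards m, b unchanged
      obtain ⟨hok, hle, hmax⟩ := ih c (d ++ [mb]) hc (by simp; omega) hsc hsb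
      have hG : grun (m :: c.reverse) (mb :: d.reverse) = grun c.reverse (mb :: d.reverse) := by
        simp [grun, hmmb]
      rw [hG, ← hrb]
      set g := grun c.reverse (d ++ [mb]).reverse with hgdef
      refine ⟨?_, by simp; omega, ?_⟩
      · intro i hi
        have hic : i < c.length := by omega
        rw [List.getD_append _ _ _ _ hic]
        exact hok i hi
      · intro k h1 h2 hup
        by_cases hkc : k ≤ c.length
        · refine hmax k h1 hkc ?_
          intro i hi
          have hic : i < c.length := by omega
          have h3 := hup i hi
          rw [List.getD_append _ _ _ _ hic] at h3
          exact h3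
        · have hkeq : k = c.length + 1 := by simp at h2; omega
          have h3 := hup (k - 1) (by omega)
          have hidx : (d ++ [mb]).length - k + (k - 1) = d.length := by simp; omega
          rw [hidx] at h3
          rw [hkeq] at h3
          simp only [Nat.add_sub_cancel] at h3
          have hma : (c ++ [m]).getD c.length 0 = m := by
            rw [List.getD_append_right _ _ _ _ (le_refl c.length)]; simp
          have hmbb : (d ++ [mb]).getD d.length 0 = mb := by
            rw [List.getD_append_right _ _ _ _ (le_refl d.length)]; simp
          rw [hma, hmbb] at h3
          exact hmmb h3

-- bridge: A's indexed while loop is grun on the reversed prefixes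
theorem solutionLoop_eq_grun (As Bs : List Int) :
    ∀ (k jn : Nat) (ans : Int), k ≤ As.length → k ≤ jn → jn ≤ Bs.length →
    solutionLoop As Bs k ((jn : Int) - 1) ans
      = ans + (grun ((As.take k).reverse) ((Bs.take jn).reverse) : Int) := by
  intro k
  induction k with
  | zero => intro jn ans _ _ _; simp [solutionLoop, grun]
  | succ k ih =>
    intro jn ans hk hkj hjn
    obtain ⟨jm, rfl⟩ : ∃ jm, jn = jm + 1 := ⟨jn - 1, by omega⟩
    have hj : ((jm + 1 : Nat) : Int) - 1 = ((jm : Nat) : Int) := by push_cast; omega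
    have hjm : jm < Bs.length := by omega
    have hkA : k < As.length := by omega
    have hB : PySem.List.pyGet? Bs ((jm : Nat) : Int) = some Bs[jm] := by
      simp [PySem.List.pyGet?_natCast, List.getElem?_eq_getElem hjm]
    have hA : PySem.List.pyGet? As ((k : Nat) : Int) = some As[k] := by
      simp [PySem.List.pyGet?_natCast, List.getElem?_eq_getElem hkA]
    have htA : (As.take (k + 1)).reverse = As[k] :: (As.take k).reverse := by
      rw [List.take_add_one, List.getElem?_eq_getElem hkA]
      simp
    have htB : (Bs.take (jm + 1)).reverse = Bs[jm] :: (Bs.take jm).reverse := by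
      rw [List.take_add_one, List.getElem?_eq_getElem hjm]
      simp
    rw [hj]
    simp only [solutionLoop, hB, hA]
    rw [htA, htB]
    by_cases hc : As[k] < Bs[jm]
    · rw [if_pos hc]
      simp only [grun, if_pos hc]
      rw [ih jm (ans + 1) (by omega) (by omega) (by omega)]
      push_cast
      ring
    · rw [if_neg hc]
      simp only [grun, if_neg hc]
      have h3 := ih (jm + 1) ans (by omega) (by omega) (by omega)
      rw [hj] at h3
      rw [h3, htB]

-- bridge: B's feasibility check decides okUp on (As, Bs.take n)
theorem altCheck_iff (As Bs : List Int) (n k : Nat) (hn : As.length = n) (hk : k ≤ n)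
    (hB : n ≤ Bs.length) : altCheck As Bs n ((k : Nat) : Int) = true ↔ okUp As (Bs.take n) k := by
  have hcast : (n : Int) - (k : Int) = ((n - k : Nat) : Int) := by omega
  unfold altCheck
  rw [hcast, PySem.List.slice_to_natCast, PySem.List.slice_natCast]
  have h2 : n - (n - k) = k := by omega
  rw [h2]
  have hlu : (As.take k).length = k := by simp; omega
  have hlv : ((Bs.drop (n-k)).take k).length = k := by simp; omega
  have hlbt : (Bs.take n).length = n := by simp; omega
  rw [List.all_eq_true]
  constructor
  · intro h i hi
    have hp := h ((As.take k)[i]'(by omega), ((Bs.drop (n-k)).take k)[i]'(by omega))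
      (by rw [List.mem_iff_getElem]; exact ⟨i, by rw [List.length_zip]; omega, by rw [List.getElem_zip]⟩)
    simp only [decide_eq_true_eq] at hp
    rw [List.getElem_take, List.getElem_take, List.getElem_drop] at hp
    rw [List.getD_eq_getElem _ _ (by omega), List.getD_eq_getElem _ _ (by rw [hlbt]; omega : (Bs.take n).length - k + i < (Bs.take n).length), List.getElem_take]
    convert hp using 3
    omega
  · intro h p hp
    rw [List.mem_iff_getElem] at hp
    obtain ⟨i, hil, hpe⟩ := hp
    rw [List.length_zip] at hil
    have hik : i < k := by omega
    rw [List.getElem_zip] at hpe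
    have := h i hik
    rw [List.getD_eq_getElem _ _ (by omega), List.getD_eq_getElem _ _ (by rw [hlbt]; omega : (Bs.take n).length - k + i < (Bs.take n).length), List.getElem_take] at this
    subst hpe
    simp only [decide_eq_true_eq]
    rw [List.getElem_take, List.getElem_take, List.getElem_drop]
    convert this using 2
    omega

-- feasibility is monotone downward in k (b sorted ascending)
theorem okUp_mono (a b : List Int) (hsb : b.Pairwise (· ≤ ·)) (k k' : Nat) (hkk : k ≤ k')
    (hk' : k' ≤ b.length) (h : okUp a b k') : okUp a b k := by
  intro i hi
  have h1 := h i (by omega)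
  have hlt2 : b.length - k + i < b.length := by omega
  have hlt1 : b.length - k' + i < b.length := by omega
  have hle : b.getD (b.length - k' + i) 0 ≤ b.getD (b.length - k + i) 0 := by
    rw [List.getD_eq_getElem _ _ hlt1, List.getD_eq_getElem _ _ hlt2]
    rcases Nat.lt_or_ge (b.length - k' + i) (b.length - k + i) with hlt | hge
    · exact (List.pairwise_iff_getElem.1 hsb) _ _ hlt1 hlt2 hlt
    · have : b.length - k' + i = b.length - k + i := by omega
      simp [this]
  exact lt_of_lt_of_le h1 hle

-- B's binary search returns the largest feasible k
theorem altBS_eq (As Bs : List Int) (n : Nat) (g : Int)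
    (hall : ∀ k : Int, 0 ≤ k → k ≤ g → altCheck As Bs n k = true)
    (hmax : ∀ k : Int, g < k → k ≤ (n : Int) → altCheck As Bs n k = false) :
    ∀ (N : Nat) (lo hi : Int), (hi - lo).toNat ≤ N → 0 ≤ lo → lo ≤ g → g ≤ hi →
      hi ≤ (n : Int) → altBS As Bs n lo hi = g := by
  intro N
  induction N with
  | zero =>
    intro lo hi hN _ h1 h2 _
    rw [altBS, dif_neg (by omega : ¬ lo < hi)]
    omega
  | succ N ih =>
    intro lo hi hN h0 h1 h2 h3
    rw [altBS]
    by_cases h : lo < hi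
    · rw [dif_pos h]
      have hmid : PySem.Int.floordiv (lo + hi + 1) 2 = (lo + hi + 1) / 2 :=
        PySem.Int.floordiv_eq_ediv_of_pos (by omega)
      set mid := PySem.Int.floordiv (lo + hi + 1) 2 with hmdef
      have hb1 : lo < mid := by omega
      have hb2 : mid ≤ hi := by omega
      by_cases hc : altCheck As Bs n mid = true
      · rw [if_pos hc]
        have hmg : mid ≤ g := by
          by_contra hno
          push Not at hno
          rw [hmax mid hno (by omega)] at hc
          exact Bool.false_ne_true hc
        exact ih mid hi (by omega) (by omega) hmg h2 h3
      · rw [if_neg hc]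
        have hgm : g ≤ mid - 1 := by
          by_contra hno
          push Not at hno
          exact hc (hall mid (by omega) (by omega))
        exact ih lo (mid - 1) (by omega) h0 h1 hgm (by omega)
    · rw [dif_neg h]
      omega

-- ===== VERDICT (by name: the statement is the Claim_ definition above) =====
theorem solution_spec : Claim_equal_solution := by
  intro A B _ hpre
  unfold Spec_solution solution solution_alt
  dsimp only
  set As := PySem.List.sorted A (fun x => x) false with hAs
  set Bs := PySem.List.sorted B (fun x => x) false with hBs
  have hlenA : As.length = A.length := PySem.List.length_sorted A (fun x => x) false
  have hlenB : Bs.length = B.length := PySem.List.length_sorted B (fun x => x) false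
  have hpre' : As.length ≤ Bs.length := by unfold Pre_solution at hpre; omega
  have hsa : As.Pairwise (· ≤ ·) := PySem.List.sorted_pairwise A (fun x => x)
  have hsb : Bs.Pairwise (· ≤ ·) := PySem.List.sorted_pairwise B (fun x => x)
  have hsbt : (Bs.take As.length).Pairwise (· ≤ ·) := hsb.sublist (List.take_sublist ..)
  have hlbt : (Bs.take As.length).length = As.length := by simp; omega
  have hmain := grun_okUp As.length As (Bs.take As.length) rfl (by omega) hsa hsbt
  rw [solutionLoop_eq_grun As Bs As.length As.length 0 le_rfl le_rfl hpre', List.take_length]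
  set g := grun As.reverse (Bs.take As.length).reverse with hg
  have hall : ∀ k : Int, 0 ≤ k → k ≤ (g : Int) → altCheck As Bs As.length k = true := by
    intro k hk0 hkg
    have hke : k = ((k.toNat : Nat) : Int) := by omega
    rw [hke]
    exact (altCheck_iff As Bs As.length k.toNat rfl (by omega) hpre').2
      (okUp_mono As (Bs.take As.length) hsbt k.toNat g (by omega) (by omega) hmain.1)
  have hmaxI : ∀ k : Int, (g : Int) < k → k ≤ (As.length : Int) →
      altCheck As Bs As.length k = false := by
    intro k h1 h2
    have hke : k = ((k.toNat : Nat) : Int) := by omega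
    by_contra hne
    have htrue : altCheck As Bs As.length k = true := by
      revert hne; cases altCheck As Bs As.length k <;> simp
    rw [hke] at htrue
    exact hmain.2.2 k.toNat (by omega) (by omega)
      ((altCheck_iff As Bs As.length k.toNat rfl (by omega) hpre').1 htrue)
  rw [altBS_eq As Bs As.length (g : Int) hall hmaxI ((As.length : Int) - 0).toNat 0
    (As.length : Int) le_rfl le_rfl (by omega) (by omega) le_rfl]
  omega
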